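-- pv_equiv track=rewrite | github.com/RulosS29/CNYT | Biblioteca_2.py | adjunta
-- ===== SOURCE A (Python) =====
-- def transpuesta(A):
--     m = len(A)
--     n = len(A[0])
--     fila = [(0,0)] * n
--     r = [fila]* m
--     for j in range(m):
--         fila = [(0,0)] * n
--         r[j] = fila
--         for k in range(n):
--             if k != j:
--                 res = A[j][k]
--                 r[j][k] = A[k][j]
--                 r[k][j] = res
--             else:
--                 r[j][k] = A[j][k]
--     return r
--
-- def adjunta(A):
--     A = transpuesta(A)
--     for j in range(len(A)):
--         for k in range(len(A)):
--             res = A[j][k][1]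
--             res = res*-1
--             A[j][k] = A[j][k][0], res
--     return A
-- ===== SOURCE B (Python) =====
-- def adjunta(A):
--     return [[(A[k][j][0], -A[k][j][1]) for k in range(len(A))]
--             for j in range(len(A[0]))]
-- ===== Notes on version B (the rewrite author's own statement) =====
-- stated objective: simpler
-- what changed: B builds the conjugate transpose directly with one nested comprehension (out[j][k] = conj(A[k][j])) instead of A's mutating transpose pass (with aliased scratch rows and symmetric double-writes) followed by a second in-place negation sweep.
import Mathlib
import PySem

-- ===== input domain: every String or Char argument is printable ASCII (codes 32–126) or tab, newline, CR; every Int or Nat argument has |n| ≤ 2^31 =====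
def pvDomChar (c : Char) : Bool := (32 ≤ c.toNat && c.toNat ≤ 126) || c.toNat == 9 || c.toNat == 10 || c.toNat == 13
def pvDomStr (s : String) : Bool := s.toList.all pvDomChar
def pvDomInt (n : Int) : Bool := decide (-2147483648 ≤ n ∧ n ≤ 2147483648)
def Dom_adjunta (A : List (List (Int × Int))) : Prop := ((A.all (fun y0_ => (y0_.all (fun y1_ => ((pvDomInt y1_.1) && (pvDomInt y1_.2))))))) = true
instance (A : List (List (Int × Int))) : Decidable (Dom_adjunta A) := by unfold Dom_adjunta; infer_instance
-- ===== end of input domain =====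

-- B builds conj(A[k][j]) directly by one nested comprehension instead of A's in-place
-- transpose pass followed by a second in-place negation sweep; return value only
-- (neither version mutates the caller's argument).

-- ===== PORT A =====
-- A[j][k] read; indices are in range on Pre_, out of range the Python raises (excluded by Pre_).
def getA (A : List (List (Int × Int))) (j k : ℕ) : Int × Int :=
  (A.getD j []).getD k ((0:Int), (0:Int))

-- Python's in-place `r[j][k] = v` as a functional row update. Exact here: the row aliasing in
-- A's `r = [fila]*m` is value-irrelevant because every aliased row is replaced by a fresh row
-- before its final value is read.
def setE (r : List (List (Int × Int))) (j k : ℕ) (v : Int × Int) : List (List (Int × Int)) :=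
  r.set j ((r.getD j []).set k v)

def transpuesta (A : List (List (Int × Int))) : List (List (Int × Int)) :=
  let m := A.length
  let n := (A.getD 0 []).length
  (List.range m).foldl (fun r j =>
    let r1 := r.set j (List.replicate n ((0:Int), (0:Int)))
    (List.range n).foldl (fun r k =>
      if k ≠ j then
        setE (setE r j k (getA A k j)) k j (getA A j k)
      else
        setE r j k (getA A j k)) r1)
    (List.replicate m (List.replicate n ((0:Int), (0:Int))))

def adjunta (A : List (List (Int × Int))) : List (List (Int × Int)) :=
  let A1 := transpuesta A
  (List.range A1.length).foldl (fun B j =>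
    (List.range A1.length).foldl (fun B k =>
      setE B j k ((getA B j k).1, (getA B j k).2 * (-1))) B) A1

-- ===== PORT B =====
def adjunta_alt (A : List (List (Int × Int))) : List (List (Int × Int)) :=
  (List.range (A.getD 0 []).length).map (fun j =>
    (List.range A.length).map (fun k =>
      ((getA A k j).1, -(getA A k j).2)))

-- ===== PRECONDITION & SPEC =====
-- Exactly the inputs on which the Python A returns (anywhere else it raises IndexError):
-- nonempty, first row exactly as long as the matrix is high, every row at least that long.
def Pre_adjunta (A : List (List (Int × Int))) : Prop :=
  A ≠ [] ∧ (A.getD 0 []).length = A.length ∧ ∀ row ∈ A, A.length ≤ row.length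
instance (A : List (List (Int × Int))) : Decidable (Pre_adjunta A) := by unfold Pre_adjunta; infer_instance

def pvWitness_adjunta : (List (List (Int × Int))) := [[(1, 2), (3, 4)], [(5, -6), (7, 8)]]

def Spec_adjunta (A : List (List (Int × Int))) (out : List (List (Int × Int))) : Prop := out = adjunta_alt A
instance (A : List (List (Int × Int))) (out : List (List (Int × Int))) : Decidable (Spec_adjunta A out) := by unfold Spec_adjunta; infer_instance

-- ===== CLAIM (what is proved, stated in full; the proofs are below) =====
def Claim_equal_adjunta : Prop := ∀ (A : List (List (Int × Int))), Dom_adjunta A → Pre_adjunta A → Spec_adjunta A (adjunta A)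

-- ===== LEMMAS AND PROOFS =====

-- matrix with m rows and m columns whose (i,c) entry is f i c
def mkM (m : ℕ) (f : ℕ → ℕ → Int × Int) : List (List (Int × Int)) :=
  (List.range m).map (fun i => (List.range m).map (f i))

-- closed form of the state inside iteration j of A's transpose loop, after t inner steps
def SIf (A : List (List (Int × Int))) (j t : ℕ) (i c : ℕ) : Int × Int :=
  if i < j then getA A c i
  else if i = j then (if c < t then getA A c i else ((0:Int),(0:Int)))
  else if c < j ∨ (c = j ∧ i < t) then getA A c i else ((0:Int),(0:Int))

-- closed form of the state of A's outer transpose loop after j iterations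
def Sf (A : List (List (Int × Int))) (j : ℕ) (i c : ℕ) : Int × Int :=
  if i < j ∨ c < j then getA A c i else ((0:Int),(0:Int))

-- closed form of the state of A's negation loop at outer j, inner k
def Nf (A : List (List (Int × Int))) (j k : ℕ) (i c : ℕ) : Int × Int :=
  if i < j ∨ (i = j ∧ c < k) then ((getA A c i).1, -(getA A c i).2) else getA A c i

theorem length_setE (r : List (List (Int × Int))) (j k : ℕ) (v : Int × Int) :
    (setE r j k v).length = r.length := by simp [setE]

theorem rowlen_setE (r : List (List (Int × Int))) (j k : ℕ) (v : Int × Int) (i : ℕ) :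
    ((setE r j k v).getD i []).length = ((r.getD i []).length) := by
  simp only [setE]
  by_cases hj : j < r.length
  · rcases eq_or_ne j i with rfl | hne
    · simp [List.getD, List.getElem?_set, hj, List.getElem?_eq_getElem hj]
    · simp [List.getD, List.getElem?_set, hne]
  · rw [List.set_eq_of_length_le (le_of_not_gt hj)]

theorem getA_setE (r : List (List (Int × Int))) (j k : ℕ) (v : Int × Int) (i c : ℕ) :
    getA (setE r j k v) i c =
      if j = i ∧ k = c ∧ j < r.length ∧ k < (r.getD j []).length then v else getA r i c := by
  by_cases hj : j < r.length
  · have hrow : r.getD j [] = r[j] := List.getD_eq_getElem r [] hj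
    rcases eq_or_ne j i with rfl | hne
    · by_cases hk : k < r[j].length
      · rcases eq_or_ne k c with rfl | hkc
        · simp [getA, setE, List.getD, List.getElem?_set, hj, hrow, hk]
        · simp [getA, setE, List.getD, List.getElem?_set, hj, hrow, hk, hkc]
      · rw [setE, hrow, List.set_eq_of_length_le (le_of_not_gt hk), List.set_getElem_self hj]
        simp [hrow, hk]
    · simp [getA, setE, List.getD, List.getElem?_set, hne]
  · rw [setE, List.set_eq_of_length_le (le_of_not_gt hj)]
    simp [hj]

theorem length_mkM (m : ℕ) (f : ℕ → ℕ → Int × Int) : (mkM m f).length = m := by simp [mkM]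

theorem rowlen_mkM (m : ℕ) (f : ℕ → ℕ → Int × Int) (i : ℕ) :
    ((mkM m f).getD i []).length = if i < m then m else 0 := by
  by_cases hi : i < m <;> simp [mkM, List.getD, List.getElem?_map, List.getElem?_range, hi]

theorem getA_mkM (m : ℕ) (f : ℕ → ℕ → Int × Int) (i c : ℕ) :
    getA (mkM m f) i c = if i < m ∧ c < m then f i c else ((0:Int),(0:Int)) := by
  by_cases hi : i < m
  · by_cases hc : c < m <;>
      simp [getA, mkM, List.getD, List.getElem?_map, List.getElem?_range, hi, hc]
  · simp [getA, mkM, List.getD, List.getElem?_map, List.getElem?_range, hi]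

theorem mat_ext (X Y : List (List (Int × Int))) (hl : X.length = Y.length)
    (hr : ∀ i, (X.getD i []).length = (Y.getD i []).length)
    (he : ∀ i c, getA X i c = getA Y i c) : X = Y := by
  apply List.ext_getElem hl
  intro i h1 h2
  apply List.ext_getElem
  · have := hr i
    simpa [List.getD, List.getElem?_eq_getElem h1, List.getElem?_eq_getElem h2] using this
  intro c hc1 hc2
  have := he i c
  simpa [getA, List.getD, List.getElem?_eq_getElem h1, List.getElem?_eq_getElem h2,
         List.getElem?_eq_getElem hc1, List.getElem?_eq_getElem hc2] using this

theorem foldl_range_inv {α : Type} (f : α → ℕ → α) (S : ℕ → α) (n : ℕ)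
    (h : ∀ j < n, f (S j) j = S (j + 1)) :
    (List.range n).foldl f (S 0) = S n := by
  induction n with
  | zero => simp
  | succ n ih =>
    rw [List.range_succ, List.foldl_append, ih (fun j hj => h j (by omega))]
    simp [h n (by omega)]

theorem inner_step (A : List (List (Int × Int))) (m j t : ℕ) (hj : j < m) (ht : t < m) :
    (if t ≠ j then setE (setE (mkM m (SIf A j t)) j t (getA A t j)) t j (getA A j t)
     else setE (mkM m (SIf A j t)) j t (getA A j t)) = mkM m (SIf A j (t + 1)) := by
  rcases eq_or_ne t j with rfl | hne
  · simp only [ne_eq, not_true_eq_false, if_false]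
    apply mat_ext
    · simp [length_setE, length_mkM]
    · intro i; simp only [rowlen_setE, rowlen_mkM]
    · intro i c
      simp only [getA_setE, length_setE, rowlen_setE, length_mkM, rowlen_mkM, getA_mkM,
        length_setE, hj, ht, if_pos]
      split_ifs <;> simp_all [SIf] <;> (try (obtain ⟨rfl, rfl⟩ := ‹_ = _ ∧ _ = _›)) <;>
        (try omega) <;> (try (split_ifs <;> simp_all <;> omega)) <;> simp_all
  · simp only [ne_eq, hne, not_false_eq_true, if_true]
    apply mat_ext
    · simp [length_setE, length_mkM]
    · intro i; simp only [rowlen_setE, rowlen_mkM]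
    · intro i c
      simp only [getA_setE, length_setE, rowlen_setE, length_mkM, rowlen_mkM, getA_mkM,
        hj, ht, if_pos]
      split_ifs <;> simp_all [SIf] <;> (try (obtain ⟨rfl, rfl⟩ := ‹_ = _ ∧ _ = _›)) <;>
        (try omega) <;> (try (split_ifs <;> simp_all <;> omega)) <;> simp_all

theorem range_map_const {α : Type} (m : ℕ) (v : α) :
    (List.range m).map (fun _ => v) = List.replicate m v := by
  apply List.ext_getElem <;> simp

theorem getD_replicate' (m c : ℕ) (v d : Int × Int) :
    (List.replicate m v).getD c d = if c < m then v else d := by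
  by_cases hc : c < m <;> simp [List.getD, List.getElem?_replicate, hc]

theorem rowlen_rowset (r : List (List (Int × Int))) (j : ℕ) (w : List (Int × Int)) (i : ℕ) :
    ((r.set j w).getD i []).length =
      if j = i ∧ j < r.length then w.length else (r.getD i []).length := by
  by_cases hj : j < r.length
  · rcases eq_or_ne j i with rfl | hne
    · simp [List.getD, List.getElem?_set, hj]
    · simp [List.getD, List.getElem?_set, hne]
  · rw [List.set_eq_of_length_le (le_of_not_gt hj)]
    simp [hj]

theorem getA_rowset (r : List (List (Int × Int))) (j : ℕ) (w : List (Int × Int)) (i c : ℕ) :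
    getA (r.set j w) i c =
      if j = i ∧ j < r.length then w.getD c ((0:Int),(0:Int)) else getA r i c := by
  by_cases hj : j < r.length
  · rcases eq_or_ne j i with rfl | hne
    · simp [getA, List.getD, List.getElem?_set, hj]
    · simp [getA, List.getD, List.getElem?_set, hne]
  · rw [List.set_eq_of_length_le (le_of_not_gt hj)]
    simp [hj]

theorem rowset_mkM (m : ℕ) (f : ℕ → ℕ → Int × Int) (j : ℕ) (v : Int × Int) (hj : j < m) :
    (mkM m f).set j (List.replicate m v) = mkM m (fun i c => if i = j then v else f i c) := by
  apply mat_ext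
  · simp [mkM]
  · intro i
    simp only [rowlen_rowset, rowlen_mkM, length_mkM, List.length_replicate]
    split_ifs <;> omega
  · intro i c
    simp only [getA_rowset, getA_mkM, length_mkM, getD_replicate']
    split_ifs <;> first | rfl | omega

theorem mkM_congr (m : ℕ) (f g : ℕ → ℕ → Int × Int)
    (h : ∀ i c, i < m → c < m → f i c = g i c) : mkM m f = mkM m g := by
  apply mat_ext
  · simp [length_mkM]
  · intro i; simp only [rowlen_mkM]
  · intro i c
    simp only [getA_mkM]
    split_ifs with hic
    · exact h i c hic.1 hic.2
    · rfl

theorem outer_step (A : List (List (Int × Int))) (m j : ℕ) (hj : j < m) :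
    (List.range m).foldl (fun r k =>
        if k ≠ j then setE (setE r j k (getA A k j)) k j (getA A j k)
        else setE r j k (getA A j k))
      ((mkM m (Sf A j)).set j (List.replicate m ((0:Int),(0:Int))))
    = mkM m (Sf A (j + 1)) := by
  have hstart : (mkM m (Sf A j)).set j (List.replicate m ((0:Int),(0:Int))) = mkM m (SIf A j 0) := by
    rw [rowset_mkM m _ j _ hj]
    apply mkM_congr
    intro i c _ _
    simp only [Sf, SIf]
    split_ifs <;> first | rfl | omega
  rw [hstart]
  rw [foldl_range_inv _ (fun t => mkM m (SIf A j t)) m (fun t ht => inner_step A m j t hj ht)]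
  apply mkM_congr
  intro i c hi hc
  simp only [Sf, SIf]
  split_ifs <;> first | rfl | omega

theorem transpuesta_eq (A : List (List (Int × Int))) (hn : (A.getD 0 []).length = A.length) :
    transpuesta A = mkM A.length (fun i c => getA A c i) := by
  have hstart : List.replicate A.length (List.replicate A.length ((0:Int),(0:Int)))
      = mkM A.length (Sf A 0) := by
    rw [show (Sf A 0) = fun _ _ => ((0:Int),(0:Int)) by funext i c; simp [Sf]]
    simp only [mkM, range_map_const]
  simp only [transpuesta, hn]
  rw [hstart]
  rw [foldl_range_inv _ (fun j => mkM A.length (Sf A j)) A.length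
        (fun j hj => outer_step A A.length j hj)]
  apply mkM_congr
  intro i c hi hc
  simp [Sf, hi]

theorem neg_inner_step (A : List (List (Int × Int))) (m j k : ℕ) (hj : j < m) (hk : k < m) :
    setE (mkM m (Nf A j k)) j k
        ((getA (mkM m (Nf A j k)) j k).1, (getA (mkM m (Nf A j k)) j k).2 * (-1))
    = mkM m (Nf A j (k + 1)) := by
  have hval : getA (mkM m (Nf A j k)) j k = getA A k j := by
    simp [getA_mkM, hj, hk, Nf]
  rw [hval]
  apply mat_ext
  · simp [length_setE, length_mkM]
  · intro i; simp only [rowlen_setE, rowlen_mkM]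
  · intro i c
    simp only [getA_setE, length_mkM, rowlen_mkM, hj, if_pos, getA_mkM]
    split_ifs <;> simp_all [Nf] <;> (try (obtain ⟨rfl, rfl⟩ := ‹_ = _ ∧ _ = _›)) <;>
      (try omega) <;> (try (split_ifs <;> simp_all <;> omega)) <;> simp_all [mul_comm]

theorem neg_outer_step (A : List (List (Int × Int))) (m j : ℕ) (hj : j < m) :
    (List.range m).foldl (fun B k =>
        setE B j k ((getA B j k).1, (getA B j k).2 * (-1))) (mkM m (Nf A j 0))
    = mkM m (Nf A (j + 1) 0) := by
  rw [foldl_range_inv _ (fun k => mkM m (Nf A j k)) m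
        (fun k hk => neg_inner_step A m j k hj hk)]
  apply mkM_congr
  intro i c hi hc
  simp only [Nf]
  split_ifs <;> first | rfl | omega

theorem adjunta_spec_aux (A : List (List (Int × Int))) (hpre : Pre_adjunta A) :
    adjunta A = adjunta_alt A := by
  obtain ⟨-, hn, -⟩ := hpre
  simp only [adjunta, transpuesta_eq A hn, length_mkM]
  have hT : mkM A.length (fun i c => getA A c i) = mkM A.length (Nf A 0 0) := by
    apply mkM_congr; intro i c _ _; simp [Nf]
  rw [hT]
  rw [foldl_range_inv _ (fun j => mkM A.length (Nf A j 0)) A.length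
        (fun j hj => neg_outer_step A A.length j hj)]
  unfold adjunta_alt
  rw [hn]
  apply mkM_congr
  intro i c hi hc
  simp [Nf, hi]

-- ===== VERDICT (by name: the statement is the Claim_ definition above) =====
theorem adjunta_spec : Claim_equal_adjunta := by
  intro A _ hpre
  exact adjunta_spec_aux A hpre
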